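-- pv_equiv track=rewrite | github.com/qianzii2/Z1DB | storage/compression/rle.py | rle_filter_eq
-- ===== SOURCE A (Python) =====
-- from typing import Any, List, Tuple
--
-- def rle_filter_eq(run_vals: list, run_lens: list, target: Any) -> list:
--     """Return indices where value == target, without decompressing."""
--     indices: list = []
--     offset = 0
--     for v, n in zip(run_vals, run_lens):
--         if v == target:
--             indices.extend(range(offset, offset + n))
--         offset += n
--     return indices
-- ===== SOURCE B (Python) =====
-- def rle_filter_eq(run_vals: list, run_lens: list, target) -> list:
--     """Walk the runs back-to-front from the total length, maintaining an end
--     offset, collect matching ranges in reverse order, then reverse and flatten."""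
--     pairs = list(zip(run_vals, run_lens))
--     end = sum(n for _, n in pairs)
--     chunks = []
--     for v, n in reversed(pairs):
--         end -= n
--         if v == target:
--             chunks.append(range(end, end + n))
--     out = []
--     for r in reversed(chunks):
--         out.extend(r)
--     return out
-- ===== Notes on version B (the rewrite author's own statement) =====
-- stated objective: alternative
-- what changed: B traverses the runs in the opposite direction: it sums the run lengths once, then walks the reversed run list maintaining an end offset (decrementing it before each run), collecting matching ranges back-to-front, and finally reverses and flattens them, instead of A's single forward pass threading a growing result list and a running start offset.
import Mathlib
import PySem

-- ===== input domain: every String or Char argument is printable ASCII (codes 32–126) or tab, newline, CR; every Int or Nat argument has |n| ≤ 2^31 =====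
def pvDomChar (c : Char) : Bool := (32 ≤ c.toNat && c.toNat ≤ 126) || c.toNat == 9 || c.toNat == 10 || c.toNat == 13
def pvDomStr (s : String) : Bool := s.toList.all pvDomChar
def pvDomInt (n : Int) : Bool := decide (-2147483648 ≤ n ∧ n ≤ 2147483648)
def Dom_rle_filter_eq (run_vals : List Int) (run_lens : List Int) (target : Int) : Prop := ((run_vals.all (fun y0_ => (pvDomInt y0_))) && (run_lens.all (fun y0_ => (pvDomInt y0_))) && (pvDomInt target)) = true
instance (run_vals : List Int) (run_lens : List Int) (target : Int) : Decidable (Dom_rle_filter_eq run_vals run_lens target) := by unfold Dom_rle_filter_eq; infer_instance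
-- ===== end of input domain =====

-- B traverses the runs back-to-front from the total length with an end offset, then reverses and flattens (alternative decomposition, same cost).

-- ===== PORT A =====
-- single forward loop threading (indices, offset) through zip(run_vals, run_lens)
def rle_filter_eq (run_vals : List Int) (run_lens : List Int) (target : Int) : List Int :=
  ((run_vals.zip run_lens).foldl
    (fun (st : List Int × Int) vn =>
      let indices := if vn.1 = target then st.1 ++ PySem.List.pyRange st.2 (st.2 + vn.2) 1 else st.1
      (indices, st.2 + vn.2))
    ([], 0)).1

-- ===== PORT B =====
-- pairs = zip; end = sum of lengths; reversed loop collecting chunks; reversed flatten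
def rle_filter_eq_alt (run_vals : List Int) (run_lens : List Int) (target : Int) : List Int :=
  let pairs := run_vals.zip run_lens
  let total := (pairs.map (fun p => p.2)).sum
  let st := pairs.reverse.foldl
      (fun (st : List (List Int) × Int) vn =>
        let e := st.2 - vn.2
        (if vn.1 = target then st.1 ++ [PySem.List.pyRange e (e + vn.2) 1] else st.1, e))
      ([], total)
  st.1.reverse.foldl (fun out r => out ++ r) []

-- ===== PRECONDITION & SPEC =====
def Spec_rle_filter_eq (run_vals : List Int) (run_lens : List Int) (target : Int) (out : List Int) : Prop := out = rle_filter_eq_alt run_vals run_lens target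
instance (run_vals : List Int) (run_lens : List Int) (target : Int) (out : List Int) : Decidable (Spec_rle_filter_eq run_vals run_lens target out) := by unfold Spec_rle_filter_eq; infer_instance

-- ===== CLAIM (what is proved, stated in full; the proofs are below) =====
def Claim_equal_rle_filter_eq : Prop := ∀ (run_vals : List Int) (run_lens : List Int) (target : Int), Dom_rle_filter_eq run_vals run_lens target → Spec_rle_filter_eq run_vals run_lens target (rle_filter_eq run_vals run_lens target)

-- ===== LEMMAS AND PROOFS =====

-- reference emission: runs paired as (value, length), starting at a given offset
def pvEmit (target : Int) : List (Int × Int) → Int → List Int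
  | [], _ => []
  | (v, n) :: zs, off =>
      (if v = target then PySem.List.pyRange off (off + n) 1 else []) ++ pvEmit target zs (off + n)

theorem pvA_foldl (target : Int) (zs : List (Int × Int)) (acc : List Int) (off : Int) :
    (zs.foldl
      (fun (st : List Int × Int) vn =>
        let indices := if vn.1 = target then st.1 ++ PySem.List.pyRange st.2 (st.2 + vn.2) 1 else st.1
        (indices, st.2 + vn.2))
      (acc, off)).1 = acc ++ pvEmit target zs off := by
  induction zs generalizing acc off with
  | nil => simp [pvEmit]
  | cons hd tl ih =>
    obtain ⟨v, n⟩ := hd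
    simp only [List.foldl_cons, pvEmit, ih]
    by_cases h : v = target <;> simp [h]

-- flatten-by-foldl
theorem pvFlat_foldl (cs : List (List Int)) (acc : List Int) :
    cs.foldl (fun out r => out ++ r) acc = acc ++ cs.flatten := by
  induction cs generalizing acc with
  | nil => simp
  | cons c cs ih => simp [ih]

-- the step function of B's reversed fold, named for the proofs
def pvStep (target : Int) (vn : Int × Int) (st : List (List Int) × Int) : List (List Int) × Int :=
  let e := st.2 - vn.2
  (if vn.1 = target then st.1 ++ [PySem.List.pyRange e (e + vn.2) 1] else st.1, e)

theorem pvB_snd (target : Int) (zs : List (Int × Int)) (T : Int) :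
    (zs.foldr (pvStep target) ([], T)).2 = T - (zs.map (fun p => p.2)).sum := by
  induction zs with
  | nil => simp
  | cons hd tl ih =>
    simp only [List.foldr_cons, pvStep, List.map_cons, List.sum_cons]
    rw [ih]; ring

theorem pvB_foldr (target : Int) (zs : List (Int × Int)) (T : Int) :
    (zs.foldr (pvStep target) ([], T)).1.reverse.flatten
      = pvEmit target zs (T - (zs.map (fun p => p.2)).sum) := by
  induction zs with
  | nil => simp [pvEmit]
  | cons hd tl ih =>
    obtain ⟨v, n⟩ := hd
    have hsnd := pvB_snd target tl T
    have harith : T - (((v, n) :: tl).map (fun p => p.2)).sum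
        = (tl.foldr (pvStep target) ([], T)).2 - n := by
      rw [hsnd]; simp [List.map_cons]; ring
    simp only [List.foldr_cons, pvEmit, pvStep]
    by_cases h : v = target
    · rw [if_pos h, if_pos h]
      rw [List.reverse_append, List.reverse_singleton, List.singleton_append,
        List.flatten_cons, ih, harith, hsnd]
      have h2 : T - (tl.map (fun p => p.2)).sum - n + n = T - (tl.map (fun p => p.2)).sum := by
        ring
      rw [h2]
    · rw [if_neg h, if_neg h, ih, harith, hsnd]
      have h2 : T - (tl.map (fun p => p.2)).sum - n + n = T - (tl.map (fun p => p.2)).sum := by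
        ring
      rw [h2, List.nil_append]

-- B's reversed-list foldl is a foldr with pvStep
theorem pvRevFold (zs : List (Int × Int)) (init : List (List Int) × Int) (target : Int) :
    zs.reverse.foldl
      (fun (st : List (List Int) × Int) vn =>
        (if vn.1 = target then st.1 ++ [PySem.List.pyRange (st.2 - vn.2) (st.2 - vn.2 + vn.2) 1] else st.1,
         st.2 - vn.2))
      init = zs.foldr (pvStep target) init := by
  rw [List.foldl_reverse]
  rfl

-- ===== VERDICT (by name: the statement is the Claim_ definition above) =====
theorem rle_filter_eq_spec : Claim_equal_rle_filter_eq := by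
  intro run_vals run_lens target _
  unfold Spec_rle_filter_eq rle_filter_eq
  rw [pvA_foldl, List.nil_append]
  simp only [rle_filter_eq_alt]
  rw [pvRevFold, pvFlat_foldl, List.nil_append, pvB_foldr, sub_self]
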